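-- pv_equiv track=rewrite | github.com/Browncodersahil/Meeting-Task-Assignment | NLP_Engine.py | _check_dependency
-- ===== SOURCE A (Python) =====
-- DEPENDENCY_SIGNALS = {"depends", "dependent", "completion", "resolved", "fixed"}
--
-- ONCE_PATTERN = ["once", "after", "when"]
--
-- def _check_dependency(tokens: list[str]) -> tuple[bool, str]:
--     lowered = set(t.lower() for t in tokens)
--
--     if lowered.intersection(DEPENDENCY_SIGNALS):
--         for token in tokens:
--             clean = token.lstrip("#")
--             if clean.isdigit():
--                 return True, f"Depends on Task #{clean}"
--         return True, "Has dependency (see transcript)"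
--
--     lower_list = [t.lower() for t in tokens]
--     for word in ONCE_PATTERN:
--         if word in lowered:
--             return True, f"Depends on prior task completion"
--
--     return False, ""
-- ===== SOURCE B (Python) =====
-- DEPENDENCY_SIGNALS = {"depends", "dependent", "completion", "resolved", "fixed"}
--
-- ONCE_PATTERN = ["once", "after", "when"]
--
-- def _check_dependency(tokens):
--     # Single linear pass with three accumulators instead of a set build,
--     # an intersection, and a conditional second scan.
--     has_signal = False
--     first_digit = None
--     has_once = False
--     for token in tokens:
--         low = token.lower()
--         if low in DEPENDENCY_SIGNALS:
--             has_signal = True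
--         if first_digit is None:
--             clean = token.lstrip("#")
--             if clean.isdigit():
--                 first_digit = clean
--         if low in ONCE_PATTERN:
--             has_once = True
--     if has_signal:
--         if first_digit is not None:
--             return True, f"Depends on Task #{first_digit}"
--         return True, "Has dependency (see transcript)"
--     if has_once:
--         return True, "Depends on prior task completion"
--     return False, ""
-- ===== Notes on version B (the rewrite author's own statement) =====
-- stated objective: alternative
-- what changed: Replaces A's set construction + set intersection + conditional second scan over tokens with one linear pass maintaining three accumulators (signal flag, first digit token, once flag) and a priority decision after the loop.
import Mathlib
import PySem

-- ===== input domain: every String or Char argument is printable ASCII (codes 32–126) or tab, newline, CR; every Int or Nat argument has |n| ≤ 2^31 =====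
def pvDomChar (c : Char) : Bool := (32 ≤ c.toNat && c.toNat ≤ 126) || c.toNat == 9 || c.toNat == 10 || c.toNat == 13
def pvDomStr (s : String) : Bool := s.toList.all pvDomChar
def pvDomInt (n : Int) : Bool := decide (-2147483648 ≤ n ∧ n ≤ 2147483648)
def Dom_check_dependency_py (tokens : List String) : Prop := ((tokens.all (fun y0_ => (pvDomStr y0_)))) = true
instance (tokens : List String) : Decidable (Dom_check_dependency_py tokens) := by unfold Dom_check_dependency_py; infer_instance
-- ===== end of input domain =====

-- B replaces A's set build + intersection + conditional second token scan with one
-- linear pass over tokens carrying three accumulators (alternative decomposition, same cost).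

-- ===== PORT A =====
def pvDepSignals : List String := ["depends", "dependent", "completion", "resolved", "fixed"]

def pvOncePattern : List String := ["once", "after", "when"]

-- token.lstrip("#"): drop leading '#' chars (exact, hand-ported: PySem has no lstrip-with-chars)
def pvLstripHash (t : String) : String := String.ofList (t.toList.dropWhile (fun c => c == '#'))

-- A's for-loop: first token whose lstrip('#') is a digit string, returned as that clean string
def pvFindDigit : List String → Option String
  | [] => none
  | t :: ts =>
    let clean := pvLstripHash t
    if PySem.Str.strIsdigit clean then some clean else pvFindDigit ts

def check_dependency_py (tokens : List String) : Bool × String :=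
  let lowered : PySem.Set String := PySem.Set.ofList (tokens.map PySem.Str.lower)
  if (PySem.Set.inter lowered pvDepSignals).isEmpty = false then
    match pvFindDigit tokens with
    | some clean => (true, "Depends on Task #" ++ clean)
    | none => (true, "Has dependency (see transcript)")
  else
    -- A's lower_list is computed but never used; the loop tests membership in `lowered`
    if pvOncePattern.any (fun w => PySem.Set.contains lowered w) then
      (true, "Depends on prior task completion")
    else (false, "")

-- ===== PORT B =====
-- the loop body of B: state = (has_signal, first_digit, has_once)
def pvStep (st : Bool × Option String × Bool) (t : String) : Bool × Option String × Bool :=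
  let low := PySem.Str.lower t
  let hasSig := st.1 || pvDepSignals.contains low
  let firstD :=
    match st.2.1 with
    | some c => some c
    | none =>
      let clean := pvLstripHash t
      if PySem.Str.strIsdigit clean then some clean else none
  let hasOnce := st.2.2 || pvOncePattern.contains low
  (hasSig, firstD, hasOnce)

def check_dependency_py_alt (tokens : List String) : Bool × String :=
  let st := tokens.foldl pvStep (false, none, false)
  if st.1 then
    match st.2.1 with
    | some c => (true, "Depends on Task #" ++ c)
    | none => (true, "Has dependency (see transcript)")
  else if st.2.2 then (true, "Depends on prior task completion")
  else (false, "")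

-- ===== PRECONDITION & SPEC =====
def Spec_check_dependency_py (tokens : List String) (out : Bool × String) : Prop := out = check_dependency_py_alt tokens
instance (tokens : List String) (out : Bool × String) : Decidable (Spec_check_dependency_py tokens out) := by unfold Spec_check_dependency_py; infer_instance

-- ===== CLAIM (what is proved, stated in full; the proofs are below) =====
def Claim_equal_check_dependency_py : Prop := ∀ (tokens : List String), Dom_check_dependency_py tokens → Spec_check_dependency_py tokens (check_dependency_py tokens)

-- ===== LEMMAS AND PROOFS =====

-- the fold's first component: "some token lowers to a dependency signal"
theorem pvFold_sig (ts : List String) (st : Bool × Option String × Bool) :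
    (ts.foldl pvStep st).1 = (st.1 || ts.any (fun t => pvDepSignals.contains (PySem.Str.lower t))) := by
  induction ts generalizing st with
  | nil => simp
  | cons t ts ih => simp [pvStep, ih, Bool.or_assoc]

-- the fold's last component: "some token lowers to a once-pattern word"
theorem pvFold_once (ts : List String) (st : Bool × Option String × Bool) :
    (ts.foldl pvStep st).2.2 = (st.2.2 || ts.any (fun t => pvOncePattern.contains (PySem.Str.lower t))) := by
  induction ts generalizing st with
  | nil => simp
  | cons t ts ih => simp [pvStep, ih, Bool.or_assoc]

-- the fold's middle component: the first digit token, i.e. A's loop result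
theorem pvFold_digit (ts : List String) (st : Bool × Option String × Bool) :
    (ts.foldl pvStep st).2.1 =
      (match st.2.1 with | some c => some c | none => pvFindDigit ts) := by
  induction ts generalizing st with
  | nil => cases h : st.2.1 <;> simp [pvFindDigit, h]
  | cons t ts ih =>
    cases h : st.2.1 with
    | some c => simp [pvStep, ih, h]
    | none =>
      simp only [List.foldl_cons, ih, pvStep, h]
      by_cases hd : PySem.Chars.strIsdigit (pvLstripHash t).toList = true <;>
        simp [pvFindDigit, hd]

-- A's signal condition equals B's accumulated flag
theorem pvSig_iff (tokens : List String) :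
    ((PySem.Set.inter (PySem.Set.ofList (tokens.map PySem.Str.lower)) pvDepSignals).isEmpty = false)
      ↔ (tokens.any (fun t => pvDepSignals.contains (PySem.Str.lower t)) = true) := by
  constructor
  · intro h
    have hne : PySem.Set.inter (PySem.Set.ofList (tokens.map PySem.Str.lower)) pvDepSignals ≠ [] := by
      simpa [List.isEmpty_iff] using h
    rcases List.exists_mem_of_ne_nil _ hne with ⟨x, hx⟩
    rcases (PySem.Set.mem_inter _ _ _).mp hx with ⟨hx1, hx2⟩
    rcases List.mem_map.mp ((PySem.Set.mem_ofList _ _).mp hx1) with ⟨t, ht, rfl⟩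
    exact List.any_eq_true.mpr ⟨t, ht, by simpa using hx2⟩
  · intro h
    rcases List.any_eq_true.mp h with ⟨t, ht, hc⟩
    have hmem : PySem.Str.lower t ∈ PySem.Set.inter (PySem.Set.ofList (tokens.map PySem.Str.lower)) pvDepSignals :=
      (PySem.Set.mem_inter _ _ _).mpr ⟨(PySem.Set.mem_ofList _ _).mpr (List.mem_map.mpr ⟨t, ht, rfl⟩), by simpa using hc⟩
    have hne : PySem.Set.inter (PySem.Set.ofList (tokens.map PySem.Str.lower)) pvDepSignals ≠ [] := by
      intro hnil; rw [hnil] at hmem; exact absurd hmem (List.not_mem_nil)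
    simpa [List.isEmpty_iff] using hne

-- A's once condition equals B's accumulated flag
theorem pvOnce_iff (tokens : List String) :
    (pvOncePattern.any (fun w => PySem.Set.contains (PySem.Set.ofList (tokens.map PySem.Str.lower)) w))
      = (tokens.any (fun t => pvOncePattern.contains (PySem.Str.lower t))) := by
  rw [Bool.eq_iff_iff]
  simp only [List.any_eq_true]
  constructor
  · rintro ⟨w, hw, hc⟩
    have hw' : w ∈ PySem.Set.ofList (tokens.map PySem.Str.lower) := by simpa using hc
    rcases List.mem_map.mp ((PySem.Set.mem_ofList _ _).mp hw') with ⟨t, ht, rfl⟩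
    exact ⟨t, ht, by simpa using hw⟩
  · rintro ⟨t, ht, hc⟩
    refine ⟨PySem.Str.lower t, by simpa using hc, ?_⟩
    have hm : PySem.Str.lower t ∈ PySem.Set.ofList (tokens.map PySem.Str.lower) :=
      (PySem.Set.mem_ofList _ _).mpr (List.mem_map.mpr ⟨t, ht, rfl⟩)
    simpa using hm

-- ===== VERDICT (by name: the statement is the Claim_ definition above) =====
theorem check_dependency_py_spec : Claim_equal_check_dependency_py := by
  intro tokens _
  unfold Spec_check_dependency_py check_dependency_py check_dependency_py_alt
  simp only [pvFold_sig, pvFold_once, pvFold_digit, Bool.false_or]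
  by_cases hs : tokens.any (fun t => pvDepSignals.contains (PySem.Str.lower t)) = true
  · rw [if_pos ((pvSig_iff tokens).mpr hs), if_pos hs]
  · rw [if_neg (fun h => hs ((pvSig_iff tokens).mp h)),
      if_neg (fun h => hs h), pvOnce_iff]
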